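-- pv_equiv track=rewrite | github.com/pypi-data/pypi-mirror-398 | packages/rendarr/rendarr-0.2.0.tar.gz/rendarr-0.2.0/rendarr/main.py | _find_axes
-- ===== SOURCE A (Python) =====
-- from typing import List, Tuple, Optional
--
-- def _find_axes(shape: Tuple[int, ...], roles: List[Optional[str]]) -> Tuple[int, int, List[int]]:
--     # find w, h axes by roles; fall back to last two axes
--     w_ax = None
--     h_ax = None
--     color_axes: List[int] = []
--
--     for i, r in enumerate(roles):
--         if r == 'w':
--             w_ax = i
--         elif r == 'h':
--             h_ax = i
--
--     # if not specified, choose last two axes as w,h (order w,h)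
--     if w_ax is None or h_ax is None:
--         # choose by largest sizes
--         axes_sorted = sorted(range(len(shape)), key=lambda i: (shape[i], i))
--         # pick the two largest
--         a, b = axes_sorted[-2], axes_sorted[-1]
--         # set w to a, h to b
--         if w_ax is None: w_ax = a
--         if h_ax is None: h_ax = b
--
--     # color axes: explicit 'c' or all others not w/h
--     explicit_c = any(r == 'c' for r in roles)
--     for i, r in enumerate(roles):
--         if i in (w_ax, h_ax):
--             continue
--         if explicit_c:
--             if r == 'c':
--                 color_axes.append(i)
--         else:
--             color_axes.append(i)
--
--     # make sure w != h
--     if w_ax == h_ax: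
--         raise ValueError("w and h axes resolve to the same axis")
--     return w_ax, h_ax, color_axes
-- ===== SOURCE B (Python) =====
-- from typing import List, Tuple, Optional
--
-- def _find_axes(shape: Tuple[int, ...], roles: List[Optional[str]]) -> Tuple[int, int, List[int]]:
--     # last-occurrence role lookup via filtered index lists, a linear top-2 scan
--     # instead of sorting all axes, and comprehension-built color axes
--     w_idx = [i for i, r in enumerate(roles) if r == 'w']
--     h_idx = [i for i, r in enumerate(roles) if r == 'h']
--     w_ax = w_idx[-1] if w_idx else None
--     h_ax = h_idx[-1] if h_idx else None
--
--     if w_ax is None or h_ax is None: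
--         # one pass: best = axis with largest (shape[i], i), second = runner-up
--         best = None
--         second = None
--         for i in range(len(shape)):
--             if best is None or (shape[i], i) > (shape[best], best):
--                 second, best = best, i
--             elif second is None or (shape[i], i) > (shape[second], second):
--                 second = i
--         if w_ax is None:
--             w_ax = second
--         if h_ax is None:
--             h_ax = best
--
--     if w_ax == h_ax:
--         raise ValueError("w and h axes resolve to the same axis")
--
--     explicit_c = 'c' in roles
--     color_axes = [i for i, r in enumerate(roles)
--                   if i != w_ax and i != h_ax and (r == 'c' if explicit_c else True)]
--     return w_ax, h_ax, color_axes
-- ===== Notes on version B (the rewrite author's own statement) =====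
-- stated objective: alternative
-- what changed: The fallback that sorted all axes by (size, index) just to take the last two is replaced by a single linear scan tracking the best and runner-up axis; the role lookups become last-of-filtered-indices and the color loop a comprehension.
import Mathlib
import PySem

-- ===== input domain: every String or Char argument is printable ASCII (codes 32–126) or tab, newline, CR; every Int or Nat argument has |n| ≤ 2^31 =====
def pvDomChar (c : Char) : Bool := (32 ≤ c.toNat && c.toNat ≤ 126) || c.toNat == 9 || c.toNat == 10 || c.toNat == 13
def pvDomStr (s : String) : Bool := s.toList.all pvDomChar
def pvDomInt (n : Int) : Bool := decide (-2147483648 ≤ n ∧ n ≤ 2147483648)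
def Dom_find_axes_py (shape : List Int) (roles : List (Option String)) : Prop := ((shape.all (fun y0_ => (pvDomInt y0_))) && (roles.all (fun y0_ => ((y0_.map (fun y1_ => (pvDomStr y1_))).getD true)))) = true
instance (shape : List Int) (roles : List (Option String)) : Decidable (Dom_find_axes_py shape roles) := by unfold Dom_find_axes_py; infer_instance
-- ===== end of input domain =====

-- B replaces A's sort-all-axes fallback by a single linear top-2 scan and the two
-- role/color loops by last-of-filtered lookups and one comprehension (objective:
-- alternative algorithm; not measurably faster in CPython).

-- ===== PORT A =====
def find_axes_py (shape : List Int) (roles : List (Option String)) : Int × Int × List Int :=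
  -- for i, r in enumerate(roles): if r == 'w': w_ax = i elif r == 'h': h_ax = i
  let st := (PySem.List.enumerate roles 0).foldl
    (fun (s : Option Int × Option Int) p =>
      if p.2 == some "w" then (some p.1, s.2)
      else if p.2 == some "h" then (s.1, some p.1)
      else s) (none, none)
  -- if w_ax is None or h_ax is None: sort axes by (shape[i], i), take last two
  let wh :=
    if st.1.isNone || st.2.isNone then
      let axes_sorted := PySem.List.sorted2 (PySem.List.pyRange 0 (shape.length : Int) 1)
        (fun i => PySem.List.pyGetD shape i 0) (fun i => i)
      let a := PySem.List.pyGetD axes_sorted (-2) 0   -- axes_sorted[-2]; IndexError (excluded by Pre_) if len < 2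
      let b := PySem.List.pyGetD axes_sorted (-1) 0
      ((if st.1.isNone then some a else st.1), (if st.2.isNone then some b else st.2))
    else st
  let w_ax := wh.1.getD 0
  let h_ax := wh.2.getD 0
  let explicit_c := roles.any (fun r => r == some "c")
  let color_axes := (PySem.List.enumerate roles 0).foldl
    (fun (acc : List Int) p =>
      if p.1 == w_ax || p.1 == h_ax then acc
      else if explicit_c then (if p.2 == some "c" then acc ++ [p.1] else acc)
      else acc ++ [p.1]) []
  -- 'if w_ax == h_ax: raise ValueError' — those inputs are excluded by Pre_
  (w_ax, h_ax, color_axes)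

-- ===== PORT B =====
-- Python tuple comparison (shape[i], i) > (shape[j], j), written out componentwise
def pvKeyGt (shape : List Int) (i j : Int) : Bool :=
  decide (PySem.List.pyGetD shape j 0 < PySem.List.pyGetD shape i 0 ∨
    (PySem.List.pyGetD shape j 0 = PySem.List.pyGetD shape i 0 ∧ j < i))

def find_axes_py_alt (shape : List Int) (roles : List (Option String)) : Int × Int × List Int :=
  let enum := PySem.List.enumerate roles 0
  let w0 := ((enum.filter (fun p => p.2 == some "w")).map (fun p => p.1)).getLast?
  let h0 := ((enum.filter (fun p => p.2 == some "h")).map (fun p => p.1)).getLast?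
  let wh :=
    if w0.isNone || h0.isNone then
      -- one pass: best = axis with largest (shape[i], i), second = runner-up
      let tb := (PySem.List.pyRange 0 (shape.length : Int) 1).foldl
        (fun (s : Option Int × Option Int) i =>
          if s.2.isNone || pvKeyGt shape i (s.2.getD 0) then (s.2, some i)
          else if s.1.isNone || pvKeyGt shape i (s.1.getD 0) then (some i, s.2)
          else s) (none, none)
      ((if w0.isNone then tb.1 else w0), (if h0.isNone then tb.2 else h0))
    else (w0, h0)
  let w_ax := wh.1.getD 0
  let h_ax := wh.2.getD 0
  -- 'if w_ax == h_ax: raise ValueError' — those inputs are excluded by Pre_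
  let explicit_c := roles.contains (some "c")
  let color_axes := (enum.filter (fun p =>
      p.1 != w_ax && p.1 != h_ax && (if explicit_c then p.2 == some "c" else true))).map (fun p => p.1)
  (w_ax, h_ax, color_axes)

-- ===== PRECONDITION & SPEC =====
-- helpers for Pre_ (Bool-valued so Pre_ stays decidable by infer_instance)
def pvLastRole (roles : List (Option String)) (s : String) : Option Int :=
  (((PySem.List.enumerate roles 0).filter (fun p => p.2 == some s)).map (fun p => p.1)).getLast?
def pvLtB (shape : List Int) (i j : Nat) : Bool :=
  decide (shape.getD i 0 < shape.getD j 0 ∨ (shape.getD i 0 = shape.getD j 0 ∧ i < j))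
def pvIsMaxB (shape : List Int) (i : Nat) : Bool :=
  decide (i < shape.length) && decide (∀ j < shape.length, j ≠ i → pvLtB shape j i = true)
def pvIsSndB (shape : List Int) (i : Nat) : Bool :=
  decide (i < shape.length) && !pvIsMaxB shape i &&
    decide (∀ j < shape.length, pvLtB shape i j = true → pvIsMaxB shape j = true)

-- Pre_ = exactly the inputs where A returns: it excludes the IndexError of axes_sorted[-2]
-- when a role is missing and len(shape) < 2, and the ValueError when the resolved w and h
-- axes coincide (role 'w' on the largest axis, or role 'h' on the runner-up axis).
def Pre_find_axes_py (shape : List Int) (roles : List (Option String)) : Prop :=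
  (let w := pvLastRole roles "w"
   let h := pvLastRole roles "h"
   if w.isSome && h.isSome then true
   else decide (2 ≤ shape.length)
     && (match w with | some wv => !pvIsMaxB shape wv.toNat | none => true)
     && (match h with | some hv => !pvIsSndB shape hv.toNat | none => true)) = true
instance (shape : List Int) (roles : List (Option String)) : Decidable (Pre_find_axes_py shape roles) := by unfold Pre_find_axes_py; infer_instance

def pvWitness_find_axes_py : List Int × List (Option String) := ([3, 4], [some "w", some "h"])

def Spec_find_axes_py (shape : List Int) (roles : List (Option String)) (out : Int × Int × List Int) : Prop := out = find_axes_py_alt shape roles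
instance (shape : List Int) (roles : List (Option String)) (out : Int × Int × List Int) : Decidable (Spec_find_axes_py shape roles out) := by unfold Spec_find_axes_py; infer_instance

-- ===== CLAIM (what is proved, stated in full; the proofs are below) =====
def Claim_equal_find_axes_py : Prop := ∀ (shape : List Int) (roles : List (Option String)), Dom_find_axes_py shape roles → Pre_find_axes_py shape roles → Spec_find_axes_py shape roles (find_axes_py shape roles)

-- ===== LEMMAS AND PROOFS =====

-- the lexicographic sort key of A's fallback, as a linearly ordered value
def pkey (shape : List Int) (i : Int) : Int ×ₗ Int := toLex (PySem.List.pyGetD shape i 0, i)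

theorem pkey_inj (shape : List Int) : Function.Injective (pkey shape) := by
  intro a b h
  have := congrArg (fun p => (ofLex p).2) h
  simpa [pkey] using this

theorem pkey_lt_iff (shape : List Int) (i j : Int) :
    pkey shape i < pkey shape j ↔
      (PySem.List.pyGetD shape i 0 < PySem.List.pyGetD shape j 0 ∨
        (PySem.List.pyGetD shape i 0 = PySem.List.pyGetD shape j 0 ∧ i < j)) := by
  simp [pkey, Prod.Lex.toLex_lt_toLex]

theorem pvKeyGt_eq (shape : List Int) (i j : Int) :
    pvKeyGt shape i j = decide (pkey shape j < pkey shape i) := by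
  simp [pvKeyGt, pkey_lt_iff]

theorem pkey_tricho (shape : List Int) {i j : Int} (h : i ≠ j) :
    pkey shape i < pkey shape j ∨ pkey shape j < pkey shape i :=
  lt_or_gt_of_ne ((pkey_inj shape).ne h)

-- A's sort with tuple key is a sort by the linearly ordered key pkey
theorem sorted2_eq_sorted_pkey (shape : List Int) (xs : List Int) :
    PySem.List.sorted2 xs (fun i => PySem.List.pyGetD shape i 0) (fun i => i)
      = PySem.List.sorted xs (pkey shape) := by
  unfold PySem.List.sorted2 PySem.List.sorted
  have h : (fun (a b : Int) =>
      decide (PySem.List.pyGetD shape a 0 < PySem.List.pyGetD shape b 0) ||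
        (!decide (PySem.List.pyGetD shape b 0 < PySem.List.pyGetD shape a 0) && decide (a < b)))
      = fun a b => decide (pkey shape a < pkey shape b) := by
    funext a b
    have : (pkey shape a < pkey shape b) ↔
        (PySem.List.pyGetD shape a 0 < PySem.List.pyGetD shape b 0 ∨
          (¬ PySem.List.pyGetD shape b 0 < PySem.List.pyGetD shape a 0 ∧ a < b)) := by
      rw [pkey_lt_iff]; constructor <;> rintro (h | ⟨h1, h2⟩) <;> omega
    simp [this, not_lt, ← decide_not]
  simp only [Bool.false_eq_true, if_false, h]

def pvXs (n : Nat) : List Int := PySem.List.pyRange 0 (n : Int) 1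

def pvMaxAt (shape : List Int) (n : Nat) (b : Int) : Prop :=
  b ∈ pvXs n ∧ ∀ j ∈ pvXs n, j ≠ b → pkey shape j < pkey shape b
def pvSndAt (shape : List Int) (n : Nat) (a b : Int) : Prop :=
  a ∈ pvXs n ∧ a ≠ b ∧ ∀ j ∈ pvXs n, j ≠ b → j ≠ a → pkey shape j < pkey shape a

theorem pvXs_mem (j : Int) (m : Nat) : j ∈ pvXs m ↔ 0 ≤ j ∧ j < m := by
  simp [pvXs, PySem.List.mem_pyRange_one]

theorem pvMaxAt_unique {shape : List Int} {n : Nat} {b b' : Int}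
    (h1 : pvMaxAt shape n b) (h2 : pvMaxAt shape n b') : b = b' := by
  by_contra hne
  exact absurd (h1.2 b' h2.1 (Ne.symm hne)) (not_lt_of_gt (h2.2 b h1.1 hne))

theorem pvSndAt_unique {shape : List Int} {n : Nat} {a a' b : Int}
    (h1 : pvSndAt shape n a b) (h2 : pvSndAt shape n a' b) : a = a' := by
  by_contra hne
  exact absurd (h1.2.2 a' h2.1 h2.2.1 (Ne.symm hne)) (not_lt_of_gt (h2.2.2 a h1.1 h1.2.1 hne))

-- A's fallback pair (axes_sorted[-2], axes_sorted[-1]) is (runner-up, max) when n ≥ 2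
theorem a_fallback_spec (shape : List Int) (n : Nat) (h2 : 2 ≤ n) :
    let L := PySem.List.sorted (pvXs n) (pkey shape)
    pvMaxAt shape n (PySem.List.pyGetD L (-1) 0) ∧
      pvSndAt shape n (PySem.List.pyGetD L (-2) 0) (PySem.List.pyGetD L (-1) 0) := by
  intro L
  have hlenxs : (pvXs n).length = n := by
    simp [pvXs, PySem.List.length_pyRange_one]
  have hperm : L.Perm (pvXs n) := PySem.List.sorted_perm _ _ _
  have hlen : L.length = n := by rw [hperm.length_eq, hlenxs]
  have hnd : L.Nodup := hperm.nodup_iff.mpr (by simpa [pvXs] using PySem.List.nodup_pyRange_one 0 (n:Int))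
  have hb : PySem.List.pyGetD L (-1) 0 = L[n-1]'(by omega) := by
    rw [PySem.List.pyGetD_neg_ofNat L 1 0 (by omega) (by omega)]
    simp [hlen]
  have ha : PySem.List.pyGetD L (-2) 0 = L[n-2]'(by omega) := by
    rw [PySem.List.pyGetD_neg_ofNat L 2 0 (by omega) (by omega)]
    simp [hlen]
  have hmemL : ∀ j ∈ pvXs n, j ∈ L := fun j hj => hperm.mem_iff.mpr hj
  have hmono : ∀ (p q : Nat) (hp : p < n) (hq : q < n), p ≤ q →
      pkey shape (L[p]'(by omega)) ≤ pkey shape (L[q]'(by omega)) := by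
    intro p q hp hq hpq
    have hlen' : (PySem.List.sorted (pvXs n) (pkey shape)).length = n := hlen
    exact PySem.List.key_sorted_getElem_mono (pvXs n) (pkey shape) hpq (by omega)
  have hstrict : ∀ (j : Int) (q : Nat) (hq : q < n), j ∈ pvXs n → j ≠ L[q]'(by omega) →
      (∀ (p : Nat) (hp : p < n), L[p]'(by omega) = j → p ≤ q) → pkey shape j < pkey shape (L[q]'(by omega)) := by
    intro j q hq hj hne hle
    obtain ⟨p, hp, hpj⟩ := List.mem_iff_getElem.mp (hmemL j hj)
    have hp' : p < n := by omega
    have hle' := hmono p q hp' hq (hle p hp' hpj)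
    rw [hpj] at hle'
    exact lt_of_le_of_ne hle' (fun he => hne (pkey_inj shape he))
  rw [ha, hb]
  have hbmem : (L[n-1]'(by omega)) ∈ pvXs n := hperm.mem_iff.mp (List.getElem_mem _)
  have hamem : (L[n-2]'(by omega)) ∈ pvXs n := hperm.mem_iff.mp (List.getElem_mem _)
  have hab : (L[n-2]'(by omega)) ≠ (L[n-1]'(by omega)) := by
    intro he
    have := (List.Nodup.getElem_inj_iff hnd).mp he
    omega
  refine ⟨⟨hbmem, fun j hj hne => ?_⟩, hamem, hab, fun j hj hne1 hne2 => ?_⟩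
  · exact hstrict j (n-1) (by omega) hj hne (fun p hp _ => by omega)
  · refine hstrict j (n-2) (by omega) hj hne2 (fun p hp hpj => ?_)
    by_contra hgt
    have hpn : p = n - 1 := by omega
    subst hpn
    exact hne1 hpj.symm

-- B's scan, named for the induction
def pvStep (shape : List Int) (s : Option Int × Option Int) (i : Int) : Option Int × Option Int :=
  if s.2.isNone || pvKeyGt shape i (s.2.getD 0) then (s.2, some i)
  else if s.1.isNone || pvKeyGt shape i (s.1.getD 0) then (some i, s.2)
  else s
def pvFold (shape : List Int) (n : Nat) : Option Int × Option Int :=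
  (pvXs n).foldl (pvStep shape) (none, none)

theorem pvFold_succ (shape : List Int) (n : Nat) :
    pvFold shape (n + 1) = pvStep shape (pvFold shape n) (n : Int) := by
  have hsplit : pvXs (n + 1) = pvXs n ++ [(n : Int)] := by
    unfold pvXs
    push_cast
    rw [PySem.List.pyRange_one_succ_right (by positivity)]
  rw [pvFold, hsplit, List.foldl_append, List.foldl_cons, List.foldl_nil, pvFold]

-- B's one-pass scan computes (runner-up, max)
theorem b_fold_spec (shape : List Int) (n : Nat) :
    (n = 0 → pvFold shape n = (none, none)) ∧ (n = 1 → pvFold shape n = (none, some 0)) ∧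
      (2 ≤ n → ∃ a b, pvFold shape n = (some a, some b) ∧ pvMaxAt shape n b ∧ pvSndAt shape n a b) := by
  induction n with
  | zero =>
    refine ⟨fun _ => ?_, fun h => by omega, fun h => by omega⟩
    simp [pvFold, pvXs, PySem.List.pyRange_one_eq_nil]
  | succ n ih =>
    rw [pvFold_succ]
    rcases Nat.lt_or_ge n 2 with hn2 | hn2
    · interval_cases n
      · refine ⟨fun h => by omega, fun _ => ?_, fun h => by omega⟩
        rw [ih.1 rfl]
        simp [pvStep]
      · refine ⟨fun h => by omega, fun h => by omega, fun _ => ?_⟩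
        rw [ih.2.1 rfl]
        rcases pkey_tricho shape (show (0:Int) ≠ 1 by norm_num) with hk | hk
        · refine ⟨0, 1, ?_, ?_, ?_⟩
          · simp [pvStep, pvKeyGt_eq, hk]
          · refine ⟨by rw [pvXs_mem]; omega, fun j hj hne => ?_⟩
            rw [pvXs_mem] at hj
            have : j = 0 := by omega
            subst this; exact hk
          · refine ⟨by rw [pvXs_mem]; omega, by norm_num, fun j hj hne1 hne2 => ?_⟩
            rw [pvXs_mem] at hj
            omega
        · refine ⟨1, 0, ?_, ?_, ?_⟩
          · simp [pvStep, pvKeyGt_eq, not_lt_of_gt hk]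
          · refine ⟨by rw [pvXs_mem]; omega, fun j hj hne => ?_⟩
            rw [pvXs_mem] at hj
            have : j = 1 := by omega
            subst this; exact hk
          · refine ⟨by rw [pvXs_mem]; omega, by norm_num, fun j hj hne1 hne2 => ?_⟩
            rw [pvXs_mem] at hj
            omega
    · obtain ⟨a, b, hfn, hmax, hsnd⟩ := ih.2.2 hn2
      refine ⟨fun h => by omega, fun h => by omega, fun _ => ?_⟩
      rw [hfn]
      have hbmem := hmax.1
      have hamem := hsnd.1
      have hbn : b < (n : Int) := ((pvXs_mem b n).mp hbmem).2
      have han : a < (n : Int) := ((pvXs_mem a n).mp hamem).2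
      have hmemS : ∀ j : Int, j ∈ pvXs (n+1) → j ≠ (n:Int) → j ∈ pvXs n := by
        intro j hj hne
        rw [pvXs_mem] at hj ⊢
        push_cast at hj ⊢
        omega
      have hmemn : (n:Int) ∈ pvXs (n+1) := by rw [pvXs_mem]; push_cast; omega
      have hmemUp : ∀ j : Int, j ∈ pvXs n → j ∈ pvXs (n+1) := by
        intro j hj
        rw [pvXs_mem] at hj ⊢
        push_cast at hj ⊢
        omega
      have hab : pkey shape a < pkey shape b := hmax.2 a hamem hsnd.2.1
      rcases pkey_tricho shape (show b ≠ (n:Int) by omega) with hk | hk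
      · refine ⟨b, (n:Int), ?_, ⟨hmemn, fun j hj hne => ?_⟩, hmemUp b hbmem, by omega, fun j hj hne1 hne2 => ?_⟩
        · simp [pvStep, pvKeyGt_eq, hk]
        · rcases eq_or_ne j b with rfl | hjb
          · exact hk
          · exact lt_trans (hmax.2 j (hmemS j hj hne) hjb) hk
        · exact hmax.2 j (hmemS j hj hne1) hne2
      · have hnb : ¬ pkey shape b < pkey shape (n:Int) := not_lt_of_gt hk
        rcases pkey_tricho shape (show a ≠ (n:Int) by omega) with hk2 | hk2
        · refine ⟨(n:Int), b, ?_, ⟨hmemUp b hbmem, fun j hj hne => ?_⟩, hmemn, by omega, fun j hj hne1 hne2 => ?_⟩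
          · simp [pvStep, pvKeyGt_eq, hnb, hk2]
          · rcases eq_or_ne j (n:Int) with rfl | hjn
            · exact hk
            · exact hmax.2 j (hmemS j hj hjn) hne
          · rcases eq_or_ne j a with rfl | hja
            · exact hk2
            · exact lt_trans (hsnd.2.2 j (hmemS j hj hne2) hne1 hja) hk2
        · have hna : ¬ pkey shape a < pkey shape (n:Int) := not_lt_of_gt hk2
          refine ⟨a, b, ?_, ⟨hmemUp b hbmem, fun j hj hne => ?_⟩, hmemUp a hamem, hsnd.2.1, fun j hj hne1 hne2 => ?_⟩
          · simp [pvStep, pvKeyGt_eq, hnb, hna]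
          · rcases eq_or_ne j (n:Int) with rfl | hjn
            · exact lt_trans hk2 hab
            · exact hmax.2 j (hmemS j hj hjn) hne
          · rcases eq_or_ne j (n:Int) with rfl | hjn
            · exact hk2
            · exact hsnd.2.2 j (hmemS j hj hjn) hne1 hne2

-- the two fallback computations produce the same resolved values (any n, defaults when n < 2)
theorem fallback_eq (shape : List Int) :
    PySem.List.pyGetD (PySem.List.sorted2 (PySem.List.pyRange 0 (shape.length : Int) 1)
        (fun i => PySem.List.pyGetD shape i 0) (fun i => i)) (-2) 0
      = (pvFold shape shape.length).1.getD 0 ∧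
    PySem.List.pyGetD (PySem.List.sorted2 (PySem.List.pyRange 0 (shape.length : Int) 1)
        (fun i => PySem.List.pyGetD shape i 0) (fun i => i)) (-1) 0
      = (pvFold shape shape.length).2.getD 0 := by
  rw [sorted2_eq_sorted_pkey]
  have hxs : PySem.List.pyRange 0 (shape.length : Int) 1 = pvXs shape.length := rfl
  rw [hxs]
  rcases Nat.lt_or_ge shape.length 2 with hn2 | hn2
  · interval_cases h : shape.length
    · have : shape = [] := List.length_eq_zero_iff.mp h
      subst this
      decide
    · have hf := (b_fold_spec shape 1).2.1 rfl
      rw [hf]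
      have hL : PySem.List.sorted (pvXs 1) (pkey shape) = [0] := rfl
      rw [hL]
      decide
  · obtain ⟨ha, hb⟩ := a_fallback_spec shape shape.length hn2
    obtain ⟨a, b, hf, hmax, hsnd⟩ := (b_fold_spec shape shape.length).2.2 hn2
    rw [hf]
    have h1 : PySem.List.pyGetD (PySem.List.sorted (pvXs shape.length) (pkey shape)) (-1) 0 = b :=
      pvMaxAt_unique ha hmax
    refine ⟨?_, by simpa using h1⟩
    have := pvSndAt_unique (h1 ▸ hb) hsnd
    simpa using this

-- A's role loop = B's last-of-filtered lookups (generalised accumulator)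
theorem role_scan_eq (l : List (Int × Option String)) (w0 h0 : Option Int) :
    l.foldl (fun (s : Option Int × Option Int) p =>
        if p.2 == some "w" then (some p.1, s.2)
        else if p.2 == some "h" then (s.1, some p.1)
        else s) (w0, h0)
      = ((((l.filter (fun p => p.2 == some "w")).map (fun p => p.1)).getLast?).or w0,
         (((l.filter (fun p => p.2 == some "h")).map (fun p => p.1)).getLast?).or h0) := by
  induction l using List.reverseRecOn with
  | nil => simp
  | append_singleton l q ih =>
    rw [List.foldl_append, ih, List.foldl_cons, List.foldl_nil]
    by_cases hw : q.2 = some "w"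
    · have hh : ¬ (q.2 = some "h") := by rw [hw]; simp
      simp [hw]
    · by_cases hh : q.2 = some "h"
      · simp [hh]
      · simp [hw, hh]

-- A's color loop = B's comprehension, for the same w, h, explicit_c
theorem colors_eq (l : List (Int × Option String)) (w h : Int) (ec : Bool) :
    l.foldl (fun (acc : List Int) p =>
        if p.1 == w || p.1 == h then acc
        else if ec then (if p.2 == some "c" then acc ++ [p.1] else acc)
        else acc ++ [p.1]) []
      = (l.filter (fun p => p.1 != w && p.1 != h && (if ec then p.2 == some "c" else true))).map (fun p => p.1) := by
  have aux : ∀ (l : List (Int × Option String)) (acc : List Int),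
      l.foldl (fun (acc : List Int) p =>
        if p.1 == w || p.1 == h then acc
        else if ec then (if p.2 == some "c" then acc ++ [p.1] else acc)
        else acc ++ [p.1]) acc
      = acc ++ (l.filter (fun p => p.1 != w && p.1 != h && (if ec then p.2 == some "c" else true))).map (fun p => p.1) := by
    intro l
    induction l with
    | nil => simp
    | cons q t ih =>
      intro acc
      rw [List.foldl_cons, ih, List.filter_cons]
      by_cases h1 : q.1 = w
      · simp [h1]
      · by_cases h2 : q.1 = h
        · simp [h2]
        · cases ec
          · simp [h1, h2]
          · by_cases h3 : q.2 = some "c" <;> simp [h1, h2, h3]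
  simpa using aux l []

theorem any_eq_contains (roles : List (Option String)) :
    roles.any (fun r => r == some "c") = roles.contains (some "c") := by
  simp [List.any_beq']

theorem ports_eq (shape : List Int) (roles : List (Option String)) :
    find_axes_py shape roles = find_axes_py_alt shape roles := by
  unfold find_axes_py find_axes_py_alt
  rw [role_scan_eq]
  simp only [Option.or_none]
  rw [any_eq_contains]
  obtain ⟨hfa, hfb⟩ := fallback_eq shape
  rw [show ((PySem.List.pyRange 0 (shape.length : Int) 1).foldl
      (fun (s : Option Int × Option Int) i =>
        if s.2.isNone || pvKeyGt shape i (s.2.getD 0) then (s.2, some i)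
        else if s.1.isNone || pvKeyGt shape i (s.1.getD 0) then (some i, s.2)
        else s) (none, none)) = pvFold shape shape.length from rfl]
  rw [hfa, hfb]
  generalize (((PySem.List.enumerate roles 0).filter (fun p => p.2 == some "w")).map (fun p => p.1)).getLast? = w0
  generalize (((PySem.List.enumerate roles 0).filter (fun p => p.2 == some "h")).map (fun p => p.1)).getLast? = h0
  rw [colors_eq]
  cases w0 <;> cases h0 <;> simp

-- ===== VERDICT (by name: the statement is the Claim_ definition above) =====
theorem find_axes_py_spec : Claim_equal_find_axes_py := by
  intro shape roles _ _
  unfold Spec_find_axes_py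
  exact ports_eq shape roles
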